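-- pv_equiv track=rewrite | github.com/MatheusPercine/TEP | lista3/G/g1.py | is_slump
-- ===== SOURCE A (Python) =====
-- def is_slump(s, start):
--     # Slump starts with 'D' or 'E'
--     if s[start] not in 'DE':
--         return False, start
--
--     # Must be followed by one or more 'F's
--     idx = start + 1
--     if idx >= len(s) or s[idx] != 'F':
--         return False, start
--
--     while idx < len(s) and s[idx] == 'F':
--         idx += 1
--
--     # After F's, should be either 'G' or another slump
--     if idx < len(s) and s[idx] == 'G':
--         return True, idx + 1
--     elif idx < len(s):
--         return is_slump(s, idx)
--
--     return False, start
-- ===== SOURCE B (Python) =====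
-- def is_slump(s, start):
--     # Single forward scan with a small state (fcount = F's seen in current run),
--     # instead of recursion with an inner F-skipping while loop.
--     if s[start] not in 'DE':
--         return False, start
--     n = len(s)
--     seg = start        # start of the segment currently being parsed
--     i = start + 1
--     fcount = 0
--     while i < n:
--         c = s[i]
--         if c == 'F':
--             fcount += 1
--             i += 1
--         elif fcount == 0:
--             return False, seg
--         elif c == 'G':
--             return True, i + 1
--         elif c in 'DE':
--             seg = i
--             i += 1
--             fcount = 0
--         else:
--             return False, i
--     return False, seg
-- ===== Notes on version B (the rewrite author's own statement) =====
-- stated objective: simpler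
-- what changed: Replaced A's recursion with an inner F-skipping while loop by a single non-recursive forward scan that keeps a small state (current segment start and F-count of the current run).
import Mathlib
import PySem

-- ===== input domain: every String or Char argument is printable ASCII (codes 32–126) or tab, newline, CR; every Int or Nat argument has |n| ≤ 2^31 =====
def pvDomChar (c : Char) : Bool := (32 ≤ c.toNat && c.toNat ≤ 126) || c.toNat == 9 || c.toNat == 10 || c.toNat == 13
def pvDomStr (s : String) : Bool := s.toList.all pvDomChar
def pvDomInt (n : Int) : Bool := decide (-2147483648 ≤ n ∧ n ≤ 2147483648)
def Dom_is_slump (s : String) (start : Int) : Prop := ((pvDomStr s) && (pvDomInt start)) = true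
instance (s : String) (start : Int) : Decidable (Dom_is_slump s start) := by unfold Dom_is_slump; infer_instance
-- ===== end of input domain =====

-- B replaces A's recursion-with-inner-while by a single forward scan with a small
-- state (current segment start, F-count of the current run); objective: simpler.

-- ===== PORT A =====
-- the inner `while idx < len(s) and s[idx] == 'F': idx += 1` loop of A
def skipF (s : List Char) (idx : Int) : Int :=
  if h : idx < (s.length : Int) ∧ PySem.List.pyGet? s idx = some 'F'
  then skipF s (idx + 1) else idx
termination_by ((s.length : Int) - idx).toNat
decreasing_by have := h.1; omega

theorem le_skipF (s : List Char) (idx : Int) : idx ≤ skipF s idx := by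
  unfold skipF
  split
  · have := le_skipF s (idx + 1)
    omega
  · omega
termination_by ((s.length : Int) - idx).toNat
decreasing_by rename_i h; have := h.1; omega

def is_slump_rec (s : List Char) (start : Int) : Bool × Int :=
  match PySem.List.pyGet? s start with
  | none => (false, start)          -- Python raises IndexError here; excluded by Pre_
  | some c =>
    if c ≠ 'D' ∧ c ≠ 'E' then (false, start)
    else
      -- idx = start + 1
      if h1 : (s.length : Int) ≤ start + 1 ∨ PySem.List.pyGet? s (start + 1) ≠ some 'F'
      then (false, start)
      else
        let j := skipF s (start + 1)
        if j < (s.length : Int) ∧ PySem.List.pyGet? s j = some 'G' then (true, j + 1)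
        else if _h2 : j < (s.length : Int) then is_slump_rec s j
        else (false, start)
termination_by ((s.length : Int) - start).toNat
decreasing_by
  have := le_skipF s (start + 1)
  omega

def is_slump (s : String) (start : Int) : Bool × Int := is_slump_rec s.toList start

-- ===== PORT B =====
-- B's single while loop: seg = start of current segment, fcount = F's in current run
def machineLoop (s : List Char) (seg i fcount : Int) : Bool × Int :=
  if _h : i < (s.length : Int) then
    match PySem.List.pyGet? s i with
    | none => (false, i)            -- unreachable: i stays ≥ start + 1 > -len under Pre_
    | some c =>
      if c = 'F' then machineLoop s seg (i + 1) (fcount + 1)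
      else if fcount = 0 then (false, seg)
      else if c = 'G' then (true, i + 1)
      else if c = 'D' ∨ c = 'E' then machineLoop s i (i + 1) 0
      else (false, i)
  else (false, seg)
termination_by ((s.length : Int) - i).toNat
decreasing_by all_goals omega

def is_slump_alt (s : String) (start : Int) : Bool × Int :=
  match PySem.List.pyGet? s.toList start with
  | none => (false, start)          -- Python raises IndexError here; excluded by Pre_
  | some c =>
    if c = 'D' ∨ c = 'E' then machineLoop s.toList start (start + 1) 0
    else (false, start)

-- ===== PRECONDITION & SPEC =====
-- Pre_ excludes exactly the starts where Python's s[start] raises IndexError (both A and B raise there).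
def Pre_is_slump (s : String) (start : Int) : Prop := PySem.Raise.InRange s.toList.length start
instance (s : String) (start : Int) : Decidable (Pre_is_slump s start) := by unfold Pre_is_slump; infer_instance

def pvWitness_is_slump : String × Int := ("DFFG", 0)

def Spec_is_slump (s : String) (start : Int) (out : Bool × Int) : Prop := out = is_slump_alt s start
instance (s : String) (start : Int) (out : Bool × Int) : Decidable (Spec_is_slump s start out) := by unfold Spec_is_slump; infer_instance

-- ===== CLAIM (what is proved, stated in full; the proofs are below) =====
def Claim_equal_is_slump : Prop := ∀ (s : String) (start : Int), Dom_is_slump s start → Pre_is_slump s start → Spec_is_slump s start (is_slump s start)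

-- ===== LEMMAS AND PROOFS =====

theorem skipF_stop (s : List Char) (idx : Int) :
    ¬ (skipF s idx < (s.length : Int) ∧ PySem.List.pyGet? s (skipF s idx) = some 'F') := by
  unfold skipF
  split
  · exact skipF_stop s (idx + 1)
  · assumption
termination_by ((s.length : Int) - idx).toNat
decreasing_by rename_i h; have := h.1; omega


-- B's loop runs through an F-run exactly as A's skipF does
theorem machineLoop_skipF (s : List Char) (seg i f : Int) :
    machineLoop s seg i f = machineLoop s seg (skipF s i) (f + (skipF s i - i)) := by
  rw [skipF]
  split
  · rename_i h
    rw [machineLoop]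
    simp only [dif_pos h.1, h.2, reduceIte]
    rw [machineLoop_skipF s seg (i + 1) (f + 1)]
    ring_nf
  · simp
termination_by ((s.length : Int) - i).toNat
decreasing_by rename_i h; have := h.1; omega

theorem pyGet?_some_of_inRange (s : List Char) (i : Int)
    (h : PySem.Raise.InRange s.length i) : ∃ c, PySem.List.pyGet? s i = some c := by
  cases hc : PySem.List.pyGet? s i with
  | none => exact absurd h ((PySem.List.pyGet?_eq_none_iff s i).mp hc)
  | some c => exact ⟨c, rfl⟩

-- main equivalence: at a segment head that passes the D/E check, B's loop equals A's recursion
theorem main_equiv (s : List Char) (seg : Int)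
    (h0 : -(s.length : Int) ≤ seg) (h1 : seg < (s.length : Int))
    (c : Char) (hc : PySem.List.pyGet? s seg = some c) (hde : c = 'D' ∨ c = 'E') :
    machineLoop s seg (seg + 1) 0 = is_slump_rec s seg := by
  have hde' : ¬ (c ≠ 'D' ∧ c ≠ 'E') := by rcases hde with h | h <;> simp [h]
  rw [is_slump_rec]
  simp only [hc, if_neg hde']
  by_cases hF : (s.length : Int) ≤ seg + 1 ∨ PySem.List.pyGet? s (seg + 1) ≠ some 'F'
  · rw [dif_pos hF]
    rcases hF with hlen | hnf
    · rw [machineLoop, dif_neg (by omega)]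
    · by_cases hl : seg + 1 < (s.length : Int)
      · obtain ⟨c', hc'⟩ := pyGet?_some_of_inRange s (seg + 1) ⟨by omega, hl⟩
        have hc'F : c' ≠ 'F' := fun h => hnf (by rw [hc', h])
        rw [machineLoop]
        simp only [dif_pos hl, hc', if_neg hc'F, reduceIte]
      · rw [machineLoop, dif_neg hl]
  · rw [dif_neg hF]
    push_neg at hF
    obtain ⟨hlen, hf⟩ := hF
    have hj_ge : seg + 1 ≤ skipF s (seg + 1) := le_skipF s (seg + 1)
    have hj_stop := skipF_stop s (seg + 1)
    rw [machineLoop_skipF s seg (seg + 1) 0]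
    set j := skipF s (seg + 1) with hj
    -- the run is nonempty: skipF steps at least once
    have hj2 : seg + 2 ≤ j := by
      rw [hj, skipF, dif_pos ⟨by omega, hf⟩]
      have := le_skipF s (seg + 1 + 1)
      omega
    by_cases hjlen : j < (s.length : Int)
    · obtain ⟨c2, hc2⟩ := pyGet?_some_of_inRange s j ⟨by omega, hjlen⟩
      have hc2F : c2 ≠ 'F' := by
        intro h; exact hj_stop ⟨hjlen, by rw [hc2, h]⟩
      rw [machineLoop]
      simp only [dif_pos hjlen, hc2, if_neg hc2F, if_neg (show ¬ (0 + (j - (seg + 1)) = 0) by omega)]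
      by_cases hG : c2 = 'G'
      · rw [if_pos hG, if_pos ⟨hjlen, by rw [hG]⟩]
      · rw [if_neg hG, if_neg (show ¬ (j < (s.length : Int) ∧ some c2 = some 'G') by simp [hG])]
        by_cases hde2 : c2 = 'D' ∨ c2 = 'E'
        · rw [if_pos hde2]
          exact main_equiv s j (by omega) hjlen c2 hc2 hde2
        · rw [if_neg hde2, is_slump_rec]
          simp only [hc2, if_pos (show c2 ≠ 'D' ∧ c2 ≠ 'E' by push_neg at hde2; exact hde2)]
    · rw [if_neg (fun h => hjlen h.1), dif_neg (by omega), machineLoop, dif_neg (by omega)]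
termination_by ((s.length : Int) - seg).toNat
decreasing_by omega

-- ===== VERDICT (by name: the statement is the Claim_ definition above) =====
theorem is_slump_spec : Claim_equal_is_slump := by
  intro s start _ hpre
  unfold Spec_is_slump is_slump is_slump_alt
  obtain ⟨c, hc⟩ := pyGet?_some_of_inRange s.toList start hpre
  simp only [hc]
  by_cases hde : c = 'D' ∨ c = 'E'
  · rw [if_pos hde, ← main_equiv s.toList start hpre.1 hpre.2 c hc hde]
  · rw [if_neg hde, is_slump_rec]
    simp only [hc, if_pos (show c ≠ 'D' ∧ c ≠ 'E' by push_neg at hde; exact hde)]
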